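-- pv_equiv track=rewrite | github.com/ceeb-ia/ceeb_web | competicions_trampoli/services/services_classificacions_2.py | _bucket_edat
-- ===== SOURCE A (Python) =====
-- def _bucket_edat(age_max, llindars, sense_data_label):
--     if age_max is None:
--         txt = (sense_data_label or "Sense edat").strip() or "Sense edat"
--         return f"edat:{txt}"
--
--     ordered = sorted(set(int(x) for x in (llindars or [])))
--     if not ordered:
--         return f"edat:{age_max}"
--
--     for th in ordered:
--         if age_max <= th:
--             return f"edat:<={th}"
--     return f"edat:>{ordered[-1]}"
-- ===== SOURCE B (Python) =====
-- def _fallback_label(sense_data_label):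
--     t = (sense_data_label or "Sense edat").strip()
--     return t if t else "Sense edat"
--
--
-- def _bucket_edat(age_max, llindars, sense_data_label):
--     if age_max is None:
--         return "edat:" + _fallback_label(sense_data_label)
--     ordered = sorted({int(x) for x in (llindars or [])})
--     if not ordered:
--         return "edat:" + str(age_max)
--     # bisect_left binary search instead of a sequential scan
--     lo, hi = 0, len(ordered)
--     while lo < hi:
--         mid = (lo + hi) // 2
--         if ordered[mid] < age_max:
--             lo = mid + 1
--         else:
--             hi = mid
--     if lo == len(ordered):
--         return "edat:>" + str(ordered[-1])
--     return "edat:<=" + str(ordered[lo])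
-- ===== Notes on version B (the rewrite author's own statement) =====
-- stated objective: alternative
-- what changed: The linear scan over the sorted thresholds is replaced by a hand-written bisect_left binary search; the None-guard and the sorted(set(...)) preprocessing stay.
import Mathlib
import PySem

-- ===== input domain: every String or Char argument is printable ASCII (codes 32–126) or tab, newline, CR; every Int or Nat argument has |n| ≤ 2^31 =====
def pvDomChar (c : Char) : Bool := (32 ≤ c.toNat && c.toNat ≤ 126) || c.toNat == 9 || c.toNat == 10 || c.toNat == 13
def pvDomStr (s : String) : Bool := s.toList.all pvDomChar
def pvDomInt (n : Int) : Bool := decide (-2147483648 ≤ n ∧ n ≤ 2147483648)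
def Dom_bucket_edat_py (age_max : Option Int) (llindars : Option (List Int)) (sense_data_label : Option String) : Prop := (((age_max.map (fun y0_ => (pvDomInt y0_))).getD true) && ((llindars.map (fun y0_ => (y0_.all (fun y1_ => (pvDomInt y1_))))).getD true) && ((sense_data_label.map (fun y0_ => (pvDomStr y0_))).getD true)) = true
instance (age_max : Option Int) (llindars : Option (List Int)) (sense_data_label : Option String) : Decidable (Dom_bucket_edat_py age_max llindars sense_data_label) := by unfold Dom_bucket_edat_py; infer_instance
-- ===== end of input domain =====

-- B replaces A's linear scan over the sorted thresholds with a bisect_left binary search (alternative algorithm, same observable result).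

-- ===== PORT A =====
-- the for-loop over `ordered`: first threshold th with age ≤ th, else none (→ fallback)
def pvScanA (age : Int) : List Int → Option Int
  | [] => none
  | th :: rest => if age ≤ th then some th else pvScanA age rest

def bucket_edat_py (age_max : Option Int) (llindars : Option (List Int)) (sense_data_label : Option String) : String :=
  match age_max with
  | none =>
      let base : String := match sense_data_label with
        | none => "Sense edat"
        | some s => if s = "" then "Sense edat" else s
      let txt : String := if PySem.Str.strip base = "" then "Sense edat" else PySem.Str.strip base
      "edat:" ++ txt
  | some age =>
      let ordered : List Int := PySem.List.sorted (PySem.Set.ofList (llindars.getD [])) (fun x => x)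
      if ordered = [] then "edat:" ++ PySem.Int.toStr age
      else
        match pvScanA age ordered with
        | some th => "edat:<=" ++ PySem.Int.toStr th
        | none => "edat:>" ++ PySem.Int.toStr (PySem.List.pyGetD ordered (-1) 0)

-- ===== PORT B =====
-- Source B's _fallback_label helper
def pvFallbackLabel (sense_data_label : Option String) : String :=
  let t := PySem.Str.strip (match sense_data_label with
    | none => "Sense edat"
    | some s => if s = "" then "Sense edat" else s)
  if t = "" then "Sense edat" else t

-- Source B's while-loop: bisect_left on `ordered` (lo, hi : Nat; (lo+hi)//2 on non-negatives is Nat division)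
def pvBisect (xs : List Int) (x : Int) (lo hi : Nat) : Nat :=
  if h : lo < hi then
    let mid := (lo + hi) / 2
    if xs.getD mid 0 < x then pvBisect xs x (mid + 1) hi else pvBisect xs x lo mid
  else lo
termination_by hi - lo
decreasing_by all_goals omega

def bucket_edat_py_alt (age_max : Option Int) (llindars : Option (List Int)) (sense_data_label : Option String) : String :=
  match age_max with
  | none => "edat:" ++ pvFallbackLabel sense_data_label
  | some age =>
      let ordered : List Int := PySem.List.sorted (PySem.Set.ofList (llindars.getD [])) (fun x => x)
      if ordered = [] then "edat:" ++ PySem.Int.toStr age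
      else
        let lo := pvBisect ordered age 0 ordered.length
        if lo = ordered.length then "edat:>" ++ PySem.Int.toStr (PySem.List.pyGetD ordered (-1) 0)
        else "edat:<=" ++ PySem.Int.toStr (ordered.getD lo 0)

-- ===== PRECONDITION & SPEC =====
def Spec_bucket_edat_py (age_max : Option Int) (llindars : Option (List Int)) (sense_data_label : Option String) (out : String) : Prop := out = bucket_edat_py_alt age_max llindars sense_data_label
instance (age_max : Option Int) (llindars : Option (List Int)) (sense_data_label : Option String) (out : String) : Decidable (Spec_bucket_edat_py age_max llindars sense_data_label out) := by unfold Spec_bucket_edat_py; infer_instance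

-- ===== CLAIM (what is proved, stated in full; the proofs are below) =====
def Claim_equal_bucket_edat_py : Prop := ∀ (age_max : Option Int) (llindars : Option (List Int)) (sense_data_label : Option String), Dom_bucket_edat_py age_max llindars sense_data_label → Spec_bucket_edat_py age_max llindars sense_data_label (bucket_edat_py age_max llindars sense_data_label)

-- ===== LEMMAS AND PROOFS =====

-- bisect_left invariants: everything below the result is < x, everything from it on is ≥ x
theorem pvBisect_spec (xs : List Int) (x : Int)
    (hpar : ∀ i j : Nat, (hij : i ≤ j) → (hj : j < xs.length) → xs[i]'(Nat.lt_of_le_of_lt hij hj) ≤ xs[j]) :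
    ∀ lo hi : Nat, lo ≤ hi → hi ≤ xs.length →
    (∀ j : Nat, (hj : j < xs.length) → j < lo → xs[j] < x) →
    (∀ j : Nat, (hj : j < xs.length) → hi ≤ j → x ≤ xs[j]) →
    pvBisect xs x lo hi ≤ xs.length ∧
      (∀ j : Nat, (hj : j < xs.length) → j < pvBisect xs x lo hi → xs[j] < x) ∧
      (∀ j : Nat, (hj : j < xs.length) → pvBisect xs x lo hi ≤ j → x ≤ xs[j]) := by
  intro lo hi
  induction lo, hi using pvBisect.induct xs x with
  | case1 lo hi h mid hlt ih =>
      intro hle hhiL hlow hhigh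
      rw [pvBisect, dif_pos h]
      simp only [mid] at *
      rw [if_pos hlt]
      have hmid : (lo + hi) / 2 < xs.length := by omega
      exact ih (by omega) hhiL
        (fun j hj hjlt => by
          rcases Nat.lt_or_ge j ((lo + hi) / 2) with hc | hc
          · calc xs[j] ≤ xs[(lo + hi) / 2]'hmid := hpar j _ (by omega) hmid
              _ < x := by simpa [List.getD_eq_getElem?_getD, List.getElem?_eq_getElem hmid] using hlt
          · have : j = (lo + hi) / 2 := by omega
            subst this
            simpa [List.getD_eq_getElem?_getD, List.getElem?_eq_getElem hmid] using hlt)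
        hhigh
  | case2 lo hi h mid hge ih =>
      intro hle hhiL hlow hhigh
      rw [pvBisect, dif_pos h]
      simp only [mid] at *
      rw [if_neg hge]
      have hmid : (lo + hi) / 2 < xs.length := by omega
      exact ih (by omega) (by omega) hlow
        (fun j hj hjge => by
          have hx : x ≤ xs[(lo + hi) / 2]'hmid := by
            have := hge
            simp [List.getD_eq_getElem?_getD, List.getElem?_eq_getElem hmid] at this
            omega
          calc x ≤ xs[(lo + hi) / 2]'hmid := hx
            _ ≤ xs[j] := hpar _ j (by omega) hj)
  | case3 lo hi h =>
      intro hle hhiL hlow hhigh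
      rw [pvBisect, dif_neg h]
      exact ⟨by omega, hlow, fun j hj hjge => hhigh j hj (by omega)⟩

-- A's scan returns the element at any index r satisfying bisect_left's invariants
theorem pvScanA_eq (x : Int) : ∀ (xs : List Int) (r : Nat), r ≤ xs.length →
    (∀ j : Nat, (hj : j < xs.length) → j < r → xs[j] < x) →
    (∀ j : Nat, (hj : j < xs.length) → r ≤ j → x ≤ xs[j]) →
    pvScanA x xs = xs[r]? := by
  intro xs
  induction xs with
  | nil => intro r hr _ _; have h0 : r = 0 := Nat.le_zero.mp hr; subst h0; simp [pvScanA]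
  | cons a t ih =>
      intro r hr hlow hhigh
      cases r with
      | zero =>
          have : x ≤ a := hhigh 0 (by simp) (by omega)
          simp [pvScanA, this]
      | succ s =>
          have ha : a < x := hlow 0 (by simp) (by omega)
          have : ¬ x ≤ a := by omega
          rw [pvScanA, if_neg this]
          have := ih s (by simpa using hr)
            (fun j hj hjs => by
              have := hlow (j + 1) (by simpa using Nat.succ_lt_succ hj) (by omega)
              simpa using this)
            (fun j hj hjs => by
              have := hhigh (j + 1) (by simpa using Nat.succ_lt_succ hj) (by omega)
              simpa using this)
          simpa using this

-- ===== VERDICT (by name: the statement is the Claim_ definition above) =====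
theorem bucket_edat_py_spec : Claim_equal_bucket_edat_py := by
  intro age_max llindars sense_data_label _
  unfold Spec_bucket_edat_py bucket_edat_py bucket_edat_py_alt
  cases age_max with
  | none => simp only [pvFallbackLabel]
  | some age =>
      simp only
      set ordered : List Int := PySem.List.sorted (PySem.Set.ofList (llindars.getD [])) (fun x => x) with hord
      by_cases hnil : ordered = []
      · simp [hnil]
      · rw [if_neg hnil, if_neg hnil]
        have hsorted : List.Pairwise (· < ·) ordered := by
          rw [hord]; exact PySem.List.sorted_ofList_pairwise_lt _
        have hpar : ∀ i j : Nat, (hij : i ≤ j) → (hj : j < ordered.length) → ordered[i]'(Nat.lt_of_le_of_lt hij hj) ≤ ordered[j] := by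
          intro i j hij hj
          rcases Nat.lt_or_ge i j with h | h
          · exact le_of_lt ((List.pairwise_iff_getElem.mp hsorted) i j (by omega) hj h)
          · have : i = j := by omega
            subst this; exact le_refl _
        obtain ⟨hr1, hr2, hr3⟩ := pvBisect_spec ordered age hpar 0 ordered.length
          (by omega) (le_refl _) (by omega) (by omega)
        set r := pvBisect ordered age 0 ordered.length with hrdef
        have hscan : pvScanA age ordered = ordered[r]? := pvScanA_eq age ordered r hr1 hr2 hr3
        by_cases hlt : r = ordered.length
        · rw [hscan, List.getElem?_eq_none (by omega)]
          simp [hlt]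
        · have hr : r < ordered.length := by omega
          rw [hscan, List.getElem?_eq_getElem hr]
          simp [hlt, List.getD_eq_getElem?_getD, List.getElem?_eq_getElem hr]
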